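-- pv_equiv track=rewrite | github.com/samhitha-70/MLP- | exp3.py | mode_li
-- ===== SOURCE A (Python) =====
-- def mode_li(li):
--   cnt=1
--   ans=li[0]
--   for i in li:
--     if(li.count(i)>cnt):
--       cnt=li.count(i)
--       ans=i
--   return ans
-- ===== SOURCE B (Python) =====
-- def mode_li(li):
--     counts = {}
--     for x in li:
--         counts[x] = counts.get(x, 0) + 1
--     return max(counts, key=counts.get)
-- ===== Notes on version B (the rewrite author's own statement) =====
-- stated objective: faster
-- what changed: B builds a frequency dictionary in one pass and takes max over the distinct keys (first-insertion tie-break), replacing A's loop that rescans the whole list with li.count on every iteration.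
-- outside the precondition, e.g. on mode_li([]): A raises IndexError, B raises ValueError
import Mathlib
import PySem

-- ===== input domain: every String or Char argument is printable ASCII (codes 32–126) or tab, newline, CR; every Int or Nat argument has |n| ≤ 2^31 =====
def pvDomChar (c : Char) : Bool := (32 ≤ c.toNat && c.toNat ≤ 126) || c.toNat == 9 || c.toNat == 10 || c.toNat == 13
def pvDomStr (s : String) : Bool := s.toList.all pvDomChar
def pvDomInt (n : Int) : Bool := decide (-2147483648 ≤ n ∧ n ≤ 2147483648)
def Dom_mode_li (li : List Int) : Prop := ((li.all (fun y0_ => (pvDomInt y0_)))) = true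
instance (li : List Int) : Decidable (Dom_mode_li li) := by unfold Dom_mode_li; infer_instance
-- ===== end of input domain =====

-- B replaces A's quadratic rescanning loop (li.count on every iteration) with a one-pass
-- frequency dictionary followed by max over the distinct keys (first-insertion tie-break).

-- ===== PORT A =====
def mode_li (li : List Int) : Int :=
  match PySem.List.pyGet? li 0 with
  | none => 0   -- li[0] raises IndexError on []; excluded by Pre_mode_li
  | some a0 =>
    (li.foldl (fun (s : Int × Int) i =>
        if ((PySem.List.count li i : Int) > s.1) then ((PySem.List.count li i : Int), i) else s)
      (1, a0)).2

-- ===== PORT B =====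
def mode_li_alt (li : List Int) : Int :=
  let counts := li.foldl (fun d x => d.insert x (d.getD x 0 + 1)) (PySem.Dict.empty : PySem.Dict Int Int)
  match PySem.List.max? counts.keys (fun k => counts.getD k 0) with
  | some m => m
  | none => 0   -- max() over an empty dict raises ValueError; excluded by Pre_mode_li

-- ===== PRECONDITION & SPEC =====
-- A raises IndexError on [] (li[0]); B raises ValueError there (max of empty dict).
def Pre_mode_li (li : List Int) : Prop := li ≠ []
instance (li : List Int) : Decidable (Pre_mode_li li) := by unfold Pre_mode_li; infer_instance
def pvWitness_mode_li : List Int := [1, 2, 2]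

def Spec_mode_li (li : List Int) (out : Int) : Prop := out = mode_li_alt li
instance (li : List Int) (out : Int) : Decidable (Spec_mode_li li out) := by unfold Spec_mode_li; infer_instance

-- ===== CLAIM (what is proved, stated in full; the proofs are below) =====
def Claim_equal_mode_li : Prop := ∀ (li : List Int), Dom_mode_li li → Pre_mode_li li → Spec_mode_li li (mode_li li)

-- ===== LEMMAS AND PROOFS =====

-- A's pair fold (cnt, ans), started at a state whose cnt is the count of ans,
-- projects to the plain running-argmax fold.
theorem pv_pairFold (f : Int → Int) (t : List Int) (a : Int) :
    (t.foldl (fun (s : Int × Int) y => if f y > s.1 then (f y, y) else s) (f a, a))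
      = (f (t.foldl (fun m y => if f m < f y then y else m) a),
         t.foldl (fun m y => if f m < f y then y else m) a) := by
  induction t generalizing a with
  | nil => rfl
  | cons y t ih =>
    simp only [List.foldl_cons]
    by_cases h : f a < f y
    · rw [if_pos (by simpa using h), if_pos h]; exact ih y
    · rw [if_neg (by simpa using h), if_neg h]; exact ih a

-- A's whole fold over a :: t from the initial state (1, a), given count a ≥ 1.
theorem pv_AfoldInit (f : Int → Int) (t : List Int) (a : Int) (hc : 1 ≤ f a) :
    ((a :: t).foldl (fun (s : Int × Int) y => if f y > s.1 then (f y, y) else s) (1, a)).2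
      = t.foldl (fun m y => if f m < f y then y else m) a := by
  rw [List.foldl_cons]
  have hstep : (if f a > ((1 : Int), a).1 then (f a, a) else ((1 : Int), a)) = (f a, a) := by
    by_cases h1 : f a > ((1 : Int), a).1
    · rw [if_pos h1]
    · rw [if_neg h1]
      have : f a = 1 := le_antisymm (by simpa using not_lt.mp h1) hc
      rw [this]
  rw [hstep, pv_pairFold]

-- max? of a nonempty list is the running-argmax fold from its head.
theorem pv_maxSome (f : Int → Int) (t : List Int) (a : Int) :
    PySem.List.max? (a :: t) f
      = some (t.foldl (fun m y => if f m < f y then y else m) a) := by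
  simp only [PySem.List.max?, List.foldl_cons]
  induction t generalizing a with
  | nil => rfl
  | cons y t ih =>
    by_cases h : f a < f y
    · simp only [List.foldl_cons, h, ite_true]
      exact ih y
    · simp only [List.foldl_cons, h, ite_false]
      exact ih a

-- first-occurrence dedup of xs relative to already-seen elements s
def pvDedupFrom (s : List Int) : List Int → List Int
  | [] => []
  | x :: t => if x ∈ s then pvDedupFrom s t else x :: pvDedupFrom (s ++ [x]) t

theorem pv_ofListFrom (xs : List Int) : ∀ (s : List Int),
    xs.foldl PySem.Set.add s = s ++ pvDedupFrom s xs := by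
  induction xs with
  | nil => intro s; simp [pvDedupFrom]
  | cons x xs ih =>
    intro s
    simp only [List.foldl_cons, pvDedupFrom]
    by_cases h : x ∈ s
    · rw [PySem.Set.add_of_mem h, ih, if_pos h]
    · rw [PySem.Set.add_of_not_mem h, ih, if_neg h]
      simp

-- the running-argmax fold ignores elements already dominated by the accumulator,
-- so it may be run over the first-occurrence dedup instead.
theorem pv_foldDedup (f : Int → Int) (xs : List Int) : ∀ (m : Int) (s : List Int),
    (∀ y ∈ s, f y ≤ f m) →
    xs.foldl (fun m y => if f m < f y then y else m) m
      = (pvDedupFrom s xs).foldl (fun m y => if f m < f y then y else m) m := by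
  induction xs with
  | nil => intro m s _; rfl
  | cons x xs ih =>
    intro m s hs
    have hmono : f m ≤ f (if f m < f x then x else m) ∧ f x ≤ f (if f m < f x then x else m) := by
      by_cases hc : f m < f x
      · rw [if_pos hc]; exact ⟨le_of_lt hc, le_refl _⟩
      · rw [if_neg hc]; exact ⟨le_refl _, not_lt.mp hc⟩
    simp only [List.foldl_cons, pvDedupFrom]
    by_cases h : x ∈ s
    · rw [if_pos h]
      have hx : ¬ f m < f x := not_lt.mpr (hs x h)
      rw [if_neg hx]
      exact ih m s hs
    · rw [if_neg h]
      simp only [List.foldl_cons]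
      apply ih
      intro y hy
      rcases List.mem_append.mp hy with hy | hy
      · exact le_trans (hs y hy) hmono.1
      · simp only [List.mem_singleton] at hy
        rw [hy]
        exact hmono.2

-- ===== VERDICT (by name: the statement is the Claim_ definition above) =====
theorem mode_li_spec : Claim_equal_mode_li := by
  intro li _ hpre
  obtain ⟨h, t, rfl⟩ : ∃ h t, li = h :: t := by
    cases li with
    | nil => exact absurd rfl hpre
    | cons h t => exact ⟨h, t, rfl⟩
  have hpos : 0 < PySem.List.count (h :: t) h := by
    rw [PySem.List.count_eq]
    exact List.count_pos_iff.mpr List.mem_cons_self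
  have hcount : (1 : Int) ≤ ((PySem.List.count (h :: t) h : Nat) : Int) := by exact_mod_cast hpos
  have hA : mode_li (h :: t)
      = t.foldl (fun m y => if ((PySem.List.count (h :: t) m : Nat) : Int) < ((PySem.List.count (h :: t) y : Nat) : Int) then y else m) h := by
    have hget : PySem.List.pyGet? (h :: t) 0 = some h := by
      simp [PySem.List.pyGet?, PySem.List.pyIdx?]
    unfold mode_li
    rw [hget]
    exact pv_AfoldInit (fun y => ((PySem.List.count (h :: t) y : Nat) : Int)) t h hcount
  have hB : mode_li_alt (h :: t)
      = t.foldl (fun m y => if ((PySem.List.count (h :: t) m : Nat) : Int) < ((PySem.List.count (h :: t) y : Nat) : Int) then y else m) h := by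
    have halt : mode_li_alt (h :: t)
        = (match PySem.List.max? (PySem.Dict.counter (h :: t)).keys
              (fun k => (PySem.Dict.counter (h :: t)).getD k 0) with
           | some m => m
           | none => 0) := by
      rw [mode_li_alt, PySem.Dict.foldl_insert_getD_add_one_eq_counter]
    rw [halt]
    have hkeyfun : (fun k => (PySem.Dict.counter (h :: t)).getD k 0)
        = (fun k => ((PySem.List.count (h :: t) k : Nat) : Int)) := by
      funext k
      rw [PySem.Dict.getD_counter, PySem.List.count_eq]
    rw [PySem.Dict.keys_counter, hkeyfun]
    have hof : PySem.Set.ofList (h :: t) = h :: pvDedupFrom [h] t := by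
      rw [PySem.Set.ofList_eq_foldl, List.foldl_cons, pv_ofListFrom]
      rfl
    rw [hof, pv_maxSome]
    rw [← pv_foldDedup (fun y => ((PySem.List.count (h :: t) y : Nat) : Int)) t h [h]
          (by intro y hy; simp only [List.mem_singleton] at hy; rw [hy])]
  rw [Spec_mode_li, hA, hB]
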